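-- pv_equiv track=rewrite | github.com/dpiot14/Project-4th-year | utility_tools.py | string_to_number_and_string
-- ===== SOURCE A (Python) =====
-- def string_to_number_and_string(text):
--     number = ''
--     rest = ''
--     found_number = False
--
--     for char in text:
--         if char.isdigit() and not found_number:
--             number += char
--         else:
--             found_number = True
--             rest += char
--
--     try:
--         nbr = int(number)
--     except ValueError:
--         nbr = -1
--
--     return nbr, rest
-- ===== SOURCE B (Python) =====
-- def string_to_number_and_string(text):
--     chars = list(text)
--     i = 0
--     while i < len(chars) and chars[i].isdigit():
--         i += 1
--     number = ''.join(chars[:i])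
--     rest = ''.join(chars[i:])
--     try:
--         nbr = int(number)
--     except ValueError:
--         nbr = -1
--     return nbr, rest
-- ===== Notes on version B (the rewrite author's own statement) =====
-- stated objective: simpler
-- what changed: Replaces the flag-threaded dual-accumulator loop with a locate-the-boundary scan followed by two slices (prefix/suffix) joined back to strings, avoiding repeated string concatenation.
import Mathlib
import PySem

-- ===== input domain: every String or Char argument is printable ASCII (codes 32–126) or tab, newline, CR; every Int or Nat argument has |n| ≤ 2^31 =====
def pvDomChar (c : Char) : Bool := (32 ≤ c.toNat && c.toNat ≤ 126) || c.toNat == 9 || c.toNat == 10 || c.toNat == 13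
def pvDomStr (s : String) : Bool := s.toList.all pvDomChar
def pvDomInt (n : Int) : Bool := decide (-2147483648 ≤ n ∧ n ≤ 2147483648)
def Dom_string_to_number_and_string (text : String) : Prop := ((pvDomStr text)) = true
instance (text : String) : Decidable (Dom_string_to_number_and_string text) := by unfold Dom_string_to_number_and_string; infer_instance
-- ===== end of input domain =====

-- B replaces A's flag-threaded dual-accumulator loop with a boundary scan then two slices; objective: simpler.
-- ===== PORT A =====
-- loop state: (number, rest, found_number), exactly A's three variables
def pvLoopA : List Char → List Char × List Char × Bool → List Char × List Char × Bool
  | [], s => s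
  | c :: cs, (num, rest, found) =>
    if PySem.Chars.isdigit c && !found then pvLoopA cs (num ++ [c], rest, found)
    else pvLoopA cs (num, rest ++ [c], true)

def string_to_number_and_string (text : String) : Int × String :=
  let s := pvLoopA text.toList ([], [], false)
  let nbr : Int := match PySem.Int.ofChars? s.1 with
    | some n => n
    | none => -1
  (nbr, String.mk s.2.1)

-- ===== PORT B =====
-- the while-loop of Source B: count of leading digit chars
def pvSplitIdx : List Char → Nat
  | [] => 0
  | c :: cs => if PySem.Chars.isdigit c then pvSplitIdx cs + 1 else 0

def string_to_number_and_string_alt (text : String) : Int × String :=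
  let chars := text.toList
  let i := pvSplitIdx chars
  let number := chars.take i
  let rest := chars.drop i
  let nbr : Int := match PySem.Int.ofChars? number with
    | some n => n
    | none => -1
  (nbr, String.mk rest)

-- ===== PRECONDITION & SPEC =====
def Spec_string_to_number_and_string (text : String) (out : Int × String) : Prop := out = string_to_number_and_string_alt text
instance (text : String) (out : Int × String) : Decidable (Spec_string_to_number_and_string text out) := by unfold Spec_string_to_number_and_string; infer_instance

-- ===== CLAIM (what is proved, stated in full; the proofs are below) =====
def Claim_equal_string_to_number_and_string : Prop := ∀ (text : String), Dom_string_to_number_and_string text → Spec_string_to_number_and_string text (string_to_number_and_string text)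

-- ===== LEMMAS AND PROOFS =====

-- ===== VERDICT (by name: the statement is the Claim_ definition above) =====
lemma pvLoopA_found (cs : List Char) (num rest : List Char) :
    pvLoopA cs (num, rest, true) = (num, rest ++ cs, true) := by
  induction cs generalizing rest with
  | nil => simp [pvLoopA]
  | cons c cs ih => simp [pvLoopA, ih]

lemma pvLoopA_split (cs : List Char) (num rest : List Char) :
    pvLoopA cs (num, rest, false) =
      (num ++ cs.take (pvSplitIdx cs), rest ++ cs.drop (pvSplitIdx cs),
       !(cs.drop (pvSplitIdx cs)).isEmpty) := by
  induction cs generalizing num rest with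
  | nil => simp [pvLoopA, pvSplitIdx]
  | cons c cs ih =>
    by_cases h : PySem.Chars.isdigit c
    · simp [pvLoopA, pvSplitIdx, h, ih]
    · simp [pvLoopA, pvSplitIdx, h, pvLoopA_found]

theorem string_to_number_and_string_spec : Claim_equal_string_to_number_and_string := by
  intro text _
  unfold Spec_string_to_number_and_string string_to_number_and_string string_to_number_and_string_alt
  have h := pvLoopA_split text.toList [] []
  simp only [List.nil_append] at h
  rw [h]
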